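-- pv_equiv track=rewrite | github.com/bjakym/azure_cicd_test | .github/scripts/tf_folders_order.py | order_folders
-- ===== SOURCE A (Python) =====
-- def order_folders(input_list):
--     # Dictionary to store folders based on length and last child name
--     ordered_folders = {}
--
--     for folder in input_list:
--         # Split folder path into parts using '/'
--         parts = folder.split('/')
--         length = len(parts)
--         last_child_name = parts[-1]
--
--         # Initialize the dictionary if the length is not present
--         if length not in ordered_folders:
--             ordered_folders[length] = {}
--
--         # Add folder to the corresponding length and last child name
--         if last_child_name not in ordered_folders[length]:
--             ordered_folders[length][last_child_name] = [folder]
--         else: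
--             ordered_folders[length][last_child_name].append(folder)
--
--     return ordered_folders
-- ===== SOURCE B (Python) =====
-- def order_folders(input_list):
--     # Two-phase build: key every folder once, index it in a FLAT dict keyed by the
--     # (depth, last-segment) tuple plus a per-depth name-order index, then assemble
--     # the nested result with one comprehension.
--     keys = [(len(f.split('/')), f.split('/')[-1]) for f in input_list]
--     groups = {}
--     names = {}
--     for k, f in zip(keys, input_list):
--         groups.setdefault(k, []).append(f)
--         names.setdefault(k[0], {})[k[1]] = None
--     return {depth: {name: groups[(depth, name)] for name in ns}
--             for depth, ns in names.items()}
-- ===== Notes on version B (the rewrite author's own statement) =====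
-- stated objective: alternative
-- what changed: B replaces A's one-pass incremental mutation of a nested dict with a two-phase build: it keys every folder once as (depth, last segment), fills a flat dict keyed by that tuple plus a per-depth name-order index, then assembles the nested result with a single comprehension.
import Mathlib
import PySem

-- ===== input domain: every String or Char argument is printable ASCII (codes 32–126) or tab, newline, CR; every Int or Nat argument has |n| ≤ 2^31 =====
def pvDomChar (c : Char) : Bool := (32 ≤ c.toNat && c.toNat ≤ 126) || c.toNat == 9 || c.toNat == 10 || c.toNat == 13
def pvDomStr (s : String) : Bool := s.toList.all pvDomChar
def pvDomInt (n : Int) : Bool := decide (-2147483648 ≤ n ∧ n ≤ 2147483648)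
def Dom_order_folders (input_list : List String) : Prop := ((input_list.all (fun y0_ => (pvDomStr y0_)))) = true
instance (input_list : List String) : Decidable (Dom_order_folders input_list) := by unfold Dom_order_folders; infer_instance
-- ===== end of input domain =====

-- B keys each folder once as (depth, last segment) and builds the result in two phases — a flat
-- tuple-keyed grouping dict plus a per-depth name index, then one assembly comprehension —
-- instead of A's incremental mutation of the nested dict; objective: alternative decomposition.

-- shared helper: (depth, last segment) of a path.
-- '/' ≠ "" so split? is always some, and Python's split always returns a non-empty list,
-- so pyGet? parts (-1) is always some: the .getD defaults are never reached.
def pvKey (f : String) : Int × String :=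
  let parts := (PySem.Str.split? f "/").getD []
  ((parts.length : Int), (PySem.List.pyGet? parts (-1)).getD "")

-- ===== PORT A =====
def order_folders (input_list : List String) : List (Int × List (String × List String)) :=
  let ordered : PySem.Dict Int (PySem.Dict String (List String)) :=
    input_list.foldl (fun d folder =>
      let k := pvKey folder
      -- if length not in ordered_folders: ordered_folders[length] = {}
      let d := if d.contains k.1 then d else d.insert k.1 PySem.Dict.empty
      let inner := d.getD k.1 PySem.Dict.empty
      -- if last_child_name not in …: … = [folder]  else: ….append(folder)
      if inner.contains k.2 then
        d.insert k.1 (inner.insert k.2 (inner.getD k.2 [] ++ [folder]))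
      else
        d.insert k.1 (inner.insert k.2 [folder])) PySem.Dict.empty
  ordered.items.map (fun p => (p.1, p.2.items))

-- ===== PORT B =====
def order_folders_alt (input_list : List String) : List (Int × List (String × List String)) :=
  let ks := input_list.map pvKey
  let gn :=
    (ks.zip input_list).foldl
      (fun gn p =>
        (gn.1.modify p.1 [] (· ++ [p.2]),          -- groups.setdefault(k, []).append(f)
         gn.2.modify p.1.1 PySem.Dict.empty (fun m => m.insert p.1.2 ())))  -- names.setdefault(k[0], {})[k[1]] = None
      ((PySem.Dict.empty : PySem.Dict (Int × String) (List String)),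
       (PySem.Dict.empty : PySem.Dict Int (PySem.Dict String Unit)))
  -- groups[(depth, name)]: the key is always present, so the .getD default is never taken
  gn.2.items.map (fun p =>
    (p.1, p.2.keys.map (fun name => (name, gn.1.getD (p.1, name) []))))

-- ===== PRECONDITION & SPEC =====
def Spec_order_folders (input_list : List String) (out : List (Int × List (String × List String))) : Prop := out = order_folders_alt input_list
instance (input_list : List String) (out : List (Int × List (String × List String))) : Decidable (Spec_order_folders input_list out) := by unfold Spec_order_folders; infer_instance

-- ===== CLAIM (what is proved, stated in full; the proofs are below) =====
def Claim_equal_order_folders : Prop := ∀ (input_list : List String), Dom_order_folders input_list → Spec_order_folders input_list (order_folders input_list)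

-- ===== LEMMAS AND PROOFS =====

-- A's loop body is a nested Dict.modify
lemma pv_step_eq_modify (d : PySem.Dict Int (PySem.Dict String (List String))) (folder : String) :
    (let k := pvKey folder
     let d := if d.contains k.1 then d else d.insert k.1 PySem.Dict.empty
     let inner := d.getD k.1 PySem.Dict.empty
     if inner.contains k.2 then
       d.insert k.1 (inner.insert k.2 (inner.getD k.2 [] ++ [folder]))
     else
       d.insert k.1 (inner.insert k.2 [folder]))
    = d.modify (pvKey folder).1 PySem.Dict.empty
        (fun inner => inner.modify (pvKey folder).2 [] (· ++ [folder])) := by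
  simp only [PySem.Dict.modify]
  by_cases h1 : d.contains (pvKey folder).1
  · simp only [h1, if_true]
    by_cases h2 : (d.getD (pvKey folder).1 PySem.Dict.empty).contains (pvKey folder).2
    · simp [h2]
    · simp [h2, PySem.Dict.getD_of_not_contains _ _ (Bool.not_eq_true _ ▸ h2)]
  · simp only [h1, if_false, Bool.false_eq_true,
      PySem.Dict.getD_insert_self, PySem.Dict.insert_insert_self,
      PySem.Dict.getD_of_not_contains d PySem.Dict.empty (by simpa using h1)]
    simp [PySem.Dict.getD_empty]

-- getD of a keyed modify-loop: only the entries whose key matches survive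
lemma pv_getD_foldl_modify_filter {κ β ν : Type} [BEq κ] [LawfulBEq κ] [DecidableEq κ]
    (l : List β) (key : β → κ) (d0 : ν) (g : β → ν → ν) (d : PySem.Dict κ ν) (c : κ) :
    (l.foldl (fun d x => d.modify (key x) d0 (g x)) d).getD c d0
      = (l.filter (fun x => key x == c)).foldl (fun v x => g x v) (d.getD c d0) := by
  induction l generalizing d with
  | nil => rfl
  | cons x t ih =>
    simp only [List.foldl_cons, List.filter_cons, ih, PySem.Dict.getD_modify]
    by_cases h : key x = c
    · simp [h]
    · rw [if_neg (fun hh => h hh.symm)]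
      simp [h]

lemma pv_zip_map {α β : Type} (f : α → β) (l : List α) :
    (l.map f).zip l = l.map (fun x => (f x, x)) := by
  induction l with
  | nil => rfl
  | cons a t ih => simp [ih]

-- ===== VERDICT (by name: the statement is the Claim_ definition above) =====
theorem order_folders_spec : Claim_equal_order_folders := by
  unfold Claim_equal_order_folders
  intro input_list _
  unfold Spec_order_folders order_folders order_folders_alt
  dsimp only
  rw [show (fun (d : PySem.Dict Int (PySem.Dict String (List String))) folder =>
      let k := pvKey folder
      let d := if d.contains k.1 then d else d.insert k.1 PySem.Dict.empty
      let inner := d.getD k.1 PySem.Dict.empty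
      if inner.contains k.2 then
        d.insert k.1 (inner.insert k.2 (inner.getD k.2 [] ++ [folder]))
      else
        d.insert k.1 (inner.insert k.2 [folder]))
    = (fun d folder => d.modify (pvKey folder).1 PySem.Dict.empty
        (fun inner => inner.modify (pvKey folder).2 [] (· ++ [folder])))
    from funext fun d => funext fun folder => pv_step_eq_modify d folder]
  rw [pv_zip_map,
    PySem.List.foldl_prod_mk
      (f := fun (g : PySem.Dict (Int × String) (List String)) (p : (Int × String) × String) =>
        g.modify p.1 [] (· ++ [p.2]))
      (g := fun (m : PySem.Dict Int (PySem.Dict String Unit)) (p : (Int × String) × String) =>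
        m.modify p.1.1 PySem.Dict.empty (fun d => d.insert p.1.2 ()))]
  dsimp only
  -- the A-side dict and B-side indexes
  set pr := input_list.map (fun f => (pvKey f, f)) with hpr
  set D := input_list.foldl (fun d folder => d.modify (pvKey folder).1 PySem.Dict.empty
      (fun inner => inner.modify (pvKey folder).2 [] (· ++ [folder])))
      (PySem.Dict.empty : PySem.Dict Int (PySem.Dict String (List String))) with hD
  set G := pr.foldl (fun g p => g.modify p.1 [] (· ++ [p.2]))
      (PySem.Dict.empty : PySem.Dict (Int × String) (List String)) with hG
  set N := pr.foldl (fun m p => m.modify p.1.1 PySem.Dict.empty (fun d => d.insert p.1.2 ()))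
      (PySem.Dict.empty : PySem.Dict Int (PySem.Dict String Unit)) with hN
  -- outer keys of both sides: the depths, deduped in encounter order
  have hndD : D.keys.Nodup := by
    apply PySem.Dict.nodup_keys_foldl_modify_key input_list (fun f => (pvKey f).1)
      PySem.Dict.empty (fun _ f inner => inner.modify (pvKey f).2 [] (· ++ [f]))
    simp
  have hkeysD : D.keys = PySem.Set.ofList (input_list.map (fun f => (pvKey f).1)) := by
    rw [hD, PySem.Dict.keys_foldl_modify_key input_list (fun f => (pvKey f).1)
      PySem.Dict.empty (fun _ f inner => inner.modify (pvKey f).2 [] (· ++ [f]))]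
    rfl
  have hndN : N.keys.Nodup := by
    apply PySem.Dict.nodup_keys_foldl_modify_key pr (fun p => p.1.1)
      PySem.Dict.empty (fun _ p m => m.insert p.1.2 ())
    simp
  have hkeysN : N.keys = PySem.Set.ofList (input_list.map (fun f => (pvKey f).1)) := by
    rw [hN, PySem.Dict.keys_foldl_modify_key pr (fun p => p.1.1)
      PySem.Dict.empty (fun _ p m => m.insert p.1.2 ()), hpr, List.map_map]
    rfl
  -- every group list in G: the matching folders, in order
  have hGet : ∀ c, G.getD c [] = input_list.filter (fun f => pvKey f == c) := by
    intro c
    rw [hG, PySem.Dict.getD_foldl_modify_append, hpr, List.filter_map, List.map_map]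
    rw [show List.map ((fun x => x.2) ∘ fun f => (pvKey f, f)) = List.map id from rfl,
      List.map_id, PySem.Dict.getD_empty, List.nil_append]
    rfl
  rw [PySem.Dict.items_eq_map_keys D hndD PySem.Dict.empty,
    PySem.Dict.items_eq_map_keys N hndN PySem.Dict.empty,
    List.map_map, List.map_map, hkeysD, hkeysN]
  refine List.map_congr_left (fun depth _ => ?_)
  simp only [Function.comp]
  refine congrArg (Prod.mk depth) ?_
  -- A side: the per-depth inner dict is a fold over the folders of that depth
  rw [hD, pv_getD_foldl_modify_filter input_list (fun f => (pvKey f).1) PySem.Dict.empty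
      (fun f inner => inner.modify (pvKey f).2 [] (· ++ [f])), PySem.Dict.getD_empty]
  -- B side: the per-depth name index is a fold over the matching pairs
  rw [hN, pv_getD_foldl_modify_filter pr (fun p => p.1.1) PySem.Dict.empty
      (fun p m => m.insert p.1.2 ()), PySem.Dict.getD_empty]
  set lf := input_list.filter (fun f => (pvKey f).1 == depth) with hlf
  -- A side inner dict, as an items list
  set I := lf.foldl (fun inner f => inner.modify (pvKey f).2 [] (· ++ [f]))
      (PySem.Dict.empty : PySem.Dict String (List String)) with hI
  have hndI : I.keys.Nodup := by
    apply PySem.Dict.nodup_keys_foldl_modify_key lf (fun f => (pvKey f).2) []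
      (fun _ f => (· ++ [f]))
    simp
  have hkeysI : I.keys = PySem.Set.ofList (lf.map (fun f => (pvKey f).2)) := by
    rw [hI, PySem.Dict.keys_foldl_modify_key lf (fun f => (pvKey f).2) []
      (fun _ f => (· ++ [f]))]
    rfl
  rw [PySem.Dict.items_eq_map_keys I hndI [], hkeysI]
  -- B side per-depth name list = the same deduped name list
  have hkeysB : ((pr.filter (fun p => p.1.1 == depth)).foldl
        (fun m p => m.insert p.1.2 ())
        (PySem.Dict.empty : PySem.Dict String Unit)).keys
      = PySem.Set.ofList (lf.map (fun f => (pvKey f).2)) := by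
    rw [PySem.Dict.keys_foldl_insert_key (pr.filter (fun p => p.1.1 == depth))
      (fun p => p.1.2) (fun _ _ => ()), hpr, List.filter_map, List.map_map, hlf]
    rfl
  rw [hkeysB]
  refine List.map_congr_left (fun name _ => ?_)
  refine congrArg (Prod.mk name) ?_
  rw [hGet (depth, name), hI, pv_getD_foldl_modify_filter lf (fun f => (pvKey f).2) []
      (fun f v => v ++ [f]), PySem.List.foldl_append_singleton_eq_self, PySem.Dict.getD_empty, List.nil_append, hlf,
    List.filter_filter]
  exact List.filter_congr (fun f _ => by
    show ((pvKey f).2 == name && (pvKey f).1 == depth)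
        = ((pvKey f).1 == depth && (pvKey f).2 == name)
    exact Bool.and_comm _ _)
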